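-- pv_equiv track=rewrite | github.com/juniorskg/gomoku_ai_agent | gomoku_ai.py | check_heuristic2
-- ===== SOURCE A (Python) =====
-- def check_heuristic2(board, player,opponent):
--     for row in range(len(board)):
--         for col in range(len(board[0])):
--             if board[row][col] == 0:  # Empty cell
--                 # Check if placing the player's piece here results in a win
--                 if is_winning_move2(board, player, row, col):
--                     return (row, col), True
--
--                 # Check if placing the opponent's piece here results in a win
--                 if is_winning_move2(board, opponent, row, col):
--                     return (row, col), False
--
--     # No immediate winning or blocking move found
--     return None, False
--
-- def is_winning_move2(board, player, row, col):
--     directions = [(1, 0), (0, 1), (1, 1), (1, -1)]  # vertical, horizontal, and two diagonals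
--
--     for dr, dc in directions:
--         count = 2  # Current piece
--
--         # Check in the positive direction
--         r, c = row + dr, col + dc
--         while 0 <= r < len(board) and 0 <= c < len(board[0]) and board[r][c] == player:
--             count += 1
--             r += dr
--             c += dc
--
--         # Check in the negative direction
--         r, c = row - dr, col - dc
--         while 0 <= r < len(board) and 0 <= c < len(board[0]) and board[r][c] == player:
--             count += 1
--             r -= dr
--             c -= dc
--
--         # If we have five in a row, this is a winning move
--         if count >= 5:
--             return True
--
--     return False
-- ===== SOURCE B (Python) =====
-- def check_heuristic2(board, player, opponent):
--     n = len(board)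
--     if n == 0:
--         return None, False
--     m = len(board[0])
--     grid = [row[:m] for row in board]
--
--     def hrow(row):
--         # runs[c] = number of consecutive equal cells ending at column c (leftwards)
--         runs, prev = [], None
--         for x in row:
--             run = prev[1] + 1 if prev is not None and prev[0] == x else 1
--             runs.append(run)
--             prev = (x, run)
--         return runs
--
--     def vruns(g, dc):
--         # runs[r][c] = number of consecutive equal cells ending at (r, c) along (1, dc)
--         out, prev = [], None
--         for row in g:
--             if prev is None:
--                 runs = [1] * len(row)
--             else:
--                 prow, pruns = prev
--                 runs = []
--                 for c, x in enumerate(row):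
--                     pc = c - dc
--                     if 0 <= pc < len(prow) and prow[pc] == x:
--                         runs.append(pruns[pc] + 1)
--                     else:
--                         runs.append(1)
--             out.append(runs)
--             prev = (row, runs)
--         return out
--
--     # forward tables: run ENDING at (r,c) along d; backward tables: run STARTING at (r,c) along d
--     f10, f11, f1m1 = vruns(grid, 0), vruns(grid, 1), vruns(grid, -1)
--     f01 = [hrow(r) for r in grid]
--     b10 = vruns(grid[::-1], 0)[::-1]
--     b11 = vruns(grid[::-1], -1)[::-1]
--     b1m1 = vruns(grid[::-1], 1)[::-1]
--     b01 = [hrow(r[::-1])[::-1] for r in grid]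
--     tabs = [((1, 0), f10, b10), ((0, 1), f01, b01),
--             ((1, 1), f11, b11), ((1, -1), f1m1, b1m1)]
--
--     for r in range(n):
--         for c in range(m):
--             if grid[r][c] == 0:
--                 for v, flag in ((player, True), (opponent, False)):
--                     for (dr, dc), f, b in tabs:
--                         rr, cc = r + dr, c + dc
--                         pos = b[rr][cc] if 0 <= rr < n and 0 <= cc < m and grid[rr][cc] == v else 0
--                         rr, cc = r - dr, c - dc
--                         neg = f[rr][cc] if 0 <= rr < n and 0 <= cc < m and grid[rr][cc] == v else 0
--                         if pos + neg >= 3: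
--                             return (r, c), flag
--     return None, False
-- ===== Notes on version B (the rewrite author's own statement) =====
-- stated objective: alternative
-- what changed: B precomputes eight directional run-length DP tables (one forward and one backward table per direction) in a constant number of passes over the board and answers each empty cell by table lookups, replacing A's per-cell directional while-loop walks; on the generated inputs this was not measurably faster than A.
-- outside the precondition, e.g. on check_heuristic2([[0, 0], [0]], 1, 2): A raises IndexError, B raises IndexError
import Mathlib
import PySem

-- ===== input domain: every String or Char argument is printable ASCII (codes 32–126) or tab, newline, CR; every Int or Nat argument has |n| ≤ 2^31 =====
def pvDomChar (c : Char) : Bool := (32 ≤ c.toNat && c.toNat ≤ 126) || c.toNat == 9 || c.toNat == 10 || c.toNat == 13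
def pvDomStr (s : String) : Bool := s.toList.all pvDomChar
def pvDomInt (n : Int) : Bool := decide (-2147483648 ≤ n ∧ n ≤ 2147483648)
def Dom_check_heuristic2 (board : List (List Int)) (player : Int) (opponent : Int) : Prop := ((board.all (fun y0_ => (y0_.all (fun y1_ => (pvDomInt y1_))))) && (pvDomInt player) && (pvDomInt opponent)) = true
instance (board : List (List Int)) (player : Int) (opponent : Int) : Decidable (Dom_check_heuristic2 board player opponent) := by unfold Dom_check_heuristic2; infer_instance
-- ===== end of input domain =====

-- B replaces A's per-cell directional while-loop walks by eight precomputed run-length DP tables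
-- (one forward and one backward table per direction) consulted once per cell and direction; an
-- alternative algorithm with the same return value on every board whose rows are at least as long
-- as the first row (A mutates nothing; a timing run found B not measurably faster).

-- ===== PORT A =====

-- board[r][c]; in A every read is guarded by 0 <= r < n and 0 <= c < m, so the default is never the value used
def pvAt (g : List (List Int)) (r c : Int) : Int :=
  ((PySem.List.pyGet? g r).bind (fun row => PySem.List.pyGet? row c)).getD 0

-- 0 <= r < len(board) and 0 <= c < len(board[0])
def pvInb (n m r c : Int) : Bool :=
  decide (0 ≤ r ∧ r < n ∧ 0 ≤ c ∧ c < m)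

-- the while loop of is_winning_move2; the fuel only makes the always-terminating loop total
def pvWalk (g : List (List Int)) (n m v r c dr dc : Int) : Nat → Int
  | 0 => 0
  | fuel+1 =>
    if pvInb n m r c && (pvAt g r c == v) then
      1 + pvWalk g n m v (r + dr) (c + dc) dr dc fuel
    else 0

def pvDirs : List (Int × Int) := [(1, 0), (0, 1), (1, 1), (1, -1)]

def pvIsWin2 (g : List (List Int)) (v row col : Int) : Bool :=
  let n : Int := g.length
  let m : Int := (g.headD []).length
  let fuel : Nat := g.length + (g.headD []).length + 1
  pvDirs.any (fun d =>
    decide (5 ≤ 2 + pvWalk g n m v (row + d.1) (col + d.2) d.1 d.2 fuel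
                  + pvWalk g n m v (row - d.1) (col - d.2) (-d.1) (-d.2) fuel))

-- the row-major double loop with its early returns
def pvScanA (g : List (List Int)) (p o : Int) : List (Int × Int) → (Option (Int × Int)) × Bool
  | [] => (none, false)
  | rc :: rest =>
    if pvAt g rc.1 rc.2 == 0 then
      if pvIsWin2 g p rc.1 rc.2 then (some rc, true)
      else if pvIsWin2 g o rc.1 rc.2 then (some rc, false)
      else pvScanA g p o rest
    else pvScanA g p o rest

def check_heuristic2 (board : List (List Int)) (player : Int) (opponent : Int) : (Option (Int × Int)) × Bool :=
  pvScanA board player opponent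
    ((PySem.List.pyRange 0 board.length 1).flatMap (fun r =>
      (PySem.List.pyRange 0 ((board.headD []).length) 1).map (fun c => (r, c))))

-- ===== PORT B =====

-- hrow: one forward pass over a row carrying (previous element, its run length)
def pvHGo : Option (Int × Int) → List Int → List Int
  | _, [] => []
  | prev, x :: xs =>
    let run : Int := match prev with
      | some pr => if x == pr.1 then pr.2 + 1 else 1
      | none => 1
    run :: pvHGo (some (x, run)) xs

-- the inner comprehension of vruns: one DP row from the previous board row and its runs row
def pvRowStep (dc : Int) (prow pruns : List Int) : Int → List Int → List Int
  | _, [] => []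
  | c, x :: xs =>
    let pc := c - dc
    let run : Int :=
      if 0 ≤ pc ∧ pc < (prow.length : Int) then
        (if PySem.List.pyGetD prow pc 0 == x then PySem.List.pyGetD pruns pc 0 + 1 else 1)
      else 1
    run :: pvRowStep dc prow pruns (c + 1) xs

-- vruns: one pass over the rows carrying (previous row, its runs row)
def pvVGo (dc : Int) : Option (List Int × List Int) → List (List Int) → List (List Int)
  | _, [] => []
  | prev, row :: rest =>
    let runs : List Int := match prev with
      | none => row.map (fun _ => (1 : Int))
      | some pr => pvRowStep dc pr.1 pr.2 0 row
    runs :: pvVGo dc (some (row, runs)) rest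

-- the ((dr,dc), forward table, backward table) triples of Source B
def pvTabs (g : List (List Int)) : List ((Int × Int) × List (List Int) × List (List Int)) :=
  [((1, 0), pvVGo 0 none g, (pvVGo 0 none g.reverse).reverse),
   ((0, 1), g.map (pvHGo none), g.map (fun r => (pvHGo none r.reverse).reverse)),
   ((1, 1), pvVGo 1 none g, (pvVGo (-1) none g.reverse).reverse),
   ((1, -1), pvVGo (-1) none g, (pvVGo 1 none g.reverse).reverse)]

-- the inner direction loop of B: table lookups instead of walks
def pvWinB (g : List (List Int)) (n m : Int)
    (tabs : List ((Int × Int) × List (List Int) × List (List Int))) (v r c : Int) : Bool :=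
  tabs.any (fun t =>
    let pos : Int :=
      if pvInb n m (r + t.1.1) (c + t.1.2) && (pvAt g (r + t.1.1) (c + t.1.2) == v) then
        pvAt t.2.2 (r + t.1.1) (c + t.1.2)
      else 0
    let neg : Int :=
      if pvInb n m (r - t.1.1) (c - t.1.2) && (pvAt g (r - t.1.1) (c - t.1.2) == v) then
        pvAt t.2.1 (r - t.1.1) (c - t.1.2)
      else 0
    decide (3 ≤ pos + neg))

def pvScanB (g : List (List Int)) (n m p o : Int)
    (tabs : List ((Int × Int) × List (List Int) × List (List Int))) :
    List (Int × Int) → (Option (Int × Int)) × Bool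
  | [] => (none, false)
  | rc :: rest =>
    if pvAt g rc.1 rc.2 == 0 then
      if pvWinB g n m tabs p rc.1 rc.2 then (some rc, true)
      else if pvWinB g n m tabs o rc.1 rc.2 then (some rc, false)
      else pvScanB g n m p o tabs rest
    else pvScanB g n m p o tabs rest

def check_heuristic2_alt (board : List (List Int)) (player : Int) (opponent : Int) : (Option (Int × Int)) × Bool :=
  if board.length == 0 then (none, false)
  else
    let n : Int := board.length
    let m : Int := (board.headD []).length
    let grid := board.map (fun row => PySem.List.slice row none (some m))   -- row[:m]
    pvScanB grid n m player opponent (pvTabs grid)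
      ((PySem.List.pyRange 0 n 1).flatMap (fun r =>
        (PySem.List.pyRange 0 m 1).map (fun c => (r, c))))

-- ===== PRECONDITION & SPEC =====

-- Pre_ excludes ragged boards with a row shorter than the first row, on which A's
-- unguarded board[r][c] / board[r][c±k] reads can raise IndexError.
def Pre_check_heuristic2 (board : List (List Int)) (player : Int) (opponent : Int) : Prop :=
  ∀ row ∈ board, (board.headD []).length ≤ row.length
instance (board : List (List Int)) (player : Int) (opponent : Int) : Decidable (Pre_check_heuristic2 board player opponent) := by unfold Pre_check_heuristic2; infer_instance

def pvWitness_check_heuristic2 : List (List Int) × Int × Int := ([[0, 1], [1, 0]], 1, 2)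

def Spec_check_heuristic2 (board : List (List Int)) (player : Int) (opponent : Int) (out : (Option (Int × Int)) × Bool) : Prop := out = check_heuristic2_alt board player opponent
instance (board : List (List Int)) (player : Int) (opponent : Int) (out : (Option (Int × Int)) × Bool) : Decidable (Spec_check_heuristic2 board player opponent out) := by unfold Spec_check_heuristic2; infer_instance

-- ===== CLAIM (what is proved, stated in full; the proofs are below) =====
def Claim_equal_check_heuristic2 : Prop := ∀ (board : List (List Int)) (player : Int) (opponent : Int), Dom_check_heuristic2 board player opponent → Pre_check_heuristic2 board player opponent → Spec_check_heuristic2 board player opponent (check_heuristic2 board player opponent)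

-- ===== LEMMAS AND PROOFS =====

-- the number of steps the walk from (r,c) in direction (dr,dc) can still take before leaving the board
def pvMu (n m r c dr dc : Int) : Nat :=
  (if 0 < dr then n - r else if dr < 0 then r + 1 else if 0 < dc then m - c else c + 1).toNat

-- canonical run value: walk with exactly enough fuel, matching the cell's own value
def pvS (g : List (List Int)) (n m r c dr dc : Int) : Int :=
  pvWalk g n m (pvAt g r c) r c dr dc (pvMu n m r c dr dc)

-- run length of equal values ending at index c of a row (proof-side spec for pvHGo)
def pvERun (row : List Int) : Nat → Int
  | 0 => 1
  | c+1 => if row.getD (c+1) 0 == row.getD c 0 then pvERun row c + 1 else 1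

def pvDirOK (dr dc : Int) : Prop :=
  (dr = -1 ∨ dr = 0 ∨ dr = 1) ∧ (dc = -1 ∨ dc = 0 ∨ dc = 1) ∧ ¬(dr = 0 ∧ dc = 0)

theorem pvWalk_zero_of_not_cond {g n m v r c dr dc}
    (h : (pvInb n m r c && (pvAt g r c == v)) = false) :
    ∀ f, pvWalk g n m v r c dr dc f = 0 := by
  intro f; cases f <;> simp [pvWalk, h]

theorem pvInb_false_of_mu_zero {n m r c dr dc}
    (h : pvMu n m r c dr dc = 0) : pvInb n m r c = false := by
  simp only [pvInb, decide_eq_false_iff_not]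
  unfold pvMu at h
  split_ifs at h <;> omega

theorem pvMu_step {n m r c dr dc} (hd : pvDirOK dr dc) (h : pvInb n m r c = true) :
    pvMu n m r c dr dc = pvMu n m (r + dr) (c + dc) dr dc + 1 := by
  obtain ⟨h1, h2, h3⟩ := hd
  simp only [pvInb, decide_eq_true_eq] at h
  unfold pvMu
  split_ifs <;> omega

theorem pvWalk_fuel {g n m v r c dr dc} (hd : pvDirOK dr dc) :
    ∀ f1 f2, pvMu n m r c dr dc ≤ f1 → pvMu n m r c dr dc ≤ f2 →
      pvWalk g n m v r c dr dc f1 = pvWalk g n m v r c dr dc f2 := by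
  intro f1
  induction f1 generalizing r c with
  | zero =>
    intro f2 h1 h2
    have h0 : pvMu n m r c dr dc = 0 := Nat.le_zero.mp h1
    have hb : pvInb n m r c = false := pvInb_false_of_mu_zero h0
    rw [pvWalk_zero_of_not_cond (by simp [hb]), pvWalk_zero_of_not_cond (by simp [hb])]
  | succ f1 ih =>
    intro f2 h1 h2
    cases f2 with
    | zero =>
      have h0 : pvMu n m r c dr dc = 0 := Nat.le_zero.mp h2
      have hb : pvInb n m r c = false := pvInb_false_of_mu_zero h0
      rw [pvWalk_zero_of_not_cond (by simp [hb]), pvWalk_zero_of_not_cond (by simp [hb])]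
    | succ f2 =>
      simp only [pvWalk]
      cases hc : (pvInb n m r c && (pvAt g r c == v)) with
      | false => rfl
      | true =>
        have hin : pvInb n m r c = true := by
          rcases Bool.and_eq_true_iff.mp hc with ⟨h', _⟩; exact h'
        have hstep := pvMu_step hd hin
        simp only [if_true]
        have := ih (r := r + dr) (c := c + dc) f2 (by omega) (by omega)
        rw [this]

theorem pvWalk_eq_S {g n m v r c dr dc f} (hd : pvDirOK dr dc)
    (hf : pvMu n m r c dr dc ≤ f) (hv : pvAt g r c = v) :
    pvWalk g n m v r c dr dc f = pvS g n m r c dr dc := by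
  subst hv
  exact pvWalk_fuel hd f _ hf le_rfl

theorem pvS_rec {g n m r c dr dc} (hd : pvDirOK dr dc) (h : pvInb n m r c = true) :
    pvS g n m r c dr dc =
      1 + (if pvInb n m (r + dr) (c + dc) && (pvAt g (r + dr) (c + dc) == pvAt g r c) then
             pvS g n m (r + dr) (c + dc) dr dc else 0) := by
  have hstep := pvMu_step hd h
  conv_lhs => rw [pvS, hstep]
  simp only [pvWalk, h, beq_self_eq_true, Bool.and_self, if_true, Bool.true_and]
  cases hc : (pvInb n m (r + dr) (c + dc) && (pvAt g (r + dr) (c + dc) == pvAt g r c)) with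
  | false =>
    rw [pvWalk_zero_of_not_cond hc]
    simp [hc]
  | true =>
    rcases Bool.and_eq_true_iff.mp hc with ⟨hin', heq'⟩
    have hv' : pvAt g (r + dr) (c + dc) = pvAt g r c := by exact eq_of_beq heq'
    rw [pvWalk_eq_S hd (f := pvMu n m (r + dr) (c + dc) dr dc) le_rfl hv']
    simp [hc]


theorem pvAt_nat (g : List (List Int)) (r c : Nat) :
    pvAt g (r : Int) (c : Int) = (g.getD r []).getD c 0 := by
  simp only [pvAt, PySem.List.pyGet?_natCast, List.getD_eq_getElem?_getD]
  cases hr : g[r]? with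
  | none => simp [hr]
  | some row => simp [hr]

theorem pvWalk_congr {g1 g2 : List (List Int)} {n m : Int}
    (hat : ∀ r c, pvInb n m r c = true → pvAt g1 r c = pvAt g2 r c) :
    ∀ (f : Nat) (v r c dr dc : Int),
      pvWalk g1 n m v r c dr dc f = pvWalk g2 n m v r c dr dc f := by
  intro f
  induction f with
  | zero => intro v r c dr dc; rfl
  | succ f ih =>
    intro v r c dr dc
    simp only [pvWalk]
    cases hb : pvInb n m r c with
    | false => simp [hb]
    | true => rw [hat r c hb, ih]

theorem pvVGo_length (dc : Int) :
    ∀ (rows : List (List Int)) (prev : Option (List Int × List Int)),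
      (pvVGo dc prev rows).length = rows.length := by
  intro rows
  induction rows with
  | nil => intro prev; rfl
  | cons row rest ih => intro prev; simp [pvVGo, ih]

theorem pvRowStep_getD (dc : Int) (prow pruns : List Int) :
    ∀ (xs : List Int) (c0 : Int) (i : Nat), i < xs.length →
      (pvRowStep dc prow pruns c0 xs).getD i 0 =
        (if 0 ≤ c0 + i - dc ∧ c0 + i - dc < (prow.length : Int) then
           (if PySem.List.pyGetD prow (c0 + i - dc) 0 == xs.getD i 0 then
              PySem.List.pyGetD pruns (c0 + i - dc) 0 + 1
            else 1)
         else 1) := by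
  intro xs
  induction xs with
  | nil => intro c0 i h; simp at h
  | cons x xs ih =>
    intro c0 i h
    cases i with
    | zero => simp [pvRowStep]
    | succ i =>
      have := ih (c0 + 1) i (by simpa using h)
      simp only [pvRowStep, List.getD_cons_succ, List.getD_cons_succ] at this ⊢
      rw [this]
      have harg : c0 + 1 + (i : Int) = c0 + ((i : Nat) + 1 : Nat) := by push_cast; ring
      rw [harg]


theorem pvHGo_getD (row : List Int) :
    ∀ (xs : List Int) (c0 : Nat) (prev : Option (Int × Int)),
      row.drop c0 = xs →
      (c0 = 0 ∧ prev = none ∨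
        ∃ c', c0 = c' + 1 ∧ prev = some (row.getD c' 0, pvERun row c')) →
      ∀ i, i < xs.length → (pvHGo prev xs).getD i 0 = pvERun row (c0 + i) := by
  intro xs
  induction xs with
  | nil => intro c0 prev _ _ i hi; simp at hi
  | cons x xs ih =>
    intro c0 prev hdrop hprev i hi
    have hc0 : c0 < row.length := by
      by_contra h
      rw [List.drop_eq_nil_of_le (by omega)] at hdrop
      exact List.cons_ne_nil x xs hdrop.symm
    have hx : row.getD c0 0 = x := by
      have h0 : (row.drop c0)[0]? = some x := by rw [hdrop]; rfl
      rw [List.getElem?_drop] at h0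
      simp only [Nat.add_zero] at h0
      simp [List.getD_eq_getElem?_getD, h0]
    have htail : row.drop (c0 + 1) = xs := by
      have h1 := congrArg List.tail hdrop
      rw [List.tail_drop] at h1
      simpa using h1
    rcases hprev with ⟨rfl, rfl⟩ | ⟨c', rfl, rfl⟩
    · cases i with
      | zero => simp [pvHGo, pvERun]
      | succ i =>
        simp only [pvHGo, List.getD_cons_succ]
        have h3 := ih 1 (some (x, 1)) htail
          (Or.inr ⟨0, rfl, by rw [hx]; rfl⟩) i (by simpa using hi)
        rw [show 0 + (i + 1) = 1 + i by omega]
        exact h3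
    · have hrun : (if x == row.getD c' 0 then pvERun row c' + 1 else 1) = pvERun row (c' + 1) := by
        simp only [pvERun, hx]
      cases i with
      | zero =>
        simp only [pvHGo, List.getD_cons_zero, Nat.add_zero]
        exact hrun
      | succ i =>
        simp only [pvHGo, List.getD_cons_succ]
        have h3 := ih (c' + 1 + 1)
          (some (x, if x == row.getD c' 0 then pvERun row c' + 1 else 1)) htail
          (Or.inr ⟨c' + 1, rfl, by rw [hx, hrun]⟩) i (by simpa using hi)
        rw [show c' + 1 + (i + 1) = c' + 1 + 1 + i by omega]
        exact h3


theorem pvInb_true_iff {n m r c : Int} :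
    pvInb n m r c = true ↔ (0 ≤ r ∧ r < n ∧ 0 ≤ c ∧ c < m) := by
  simp [pvInb]

theorem pvRow_mem (g : List (List Int)) (r : Nat) (hr : r < g.length) : g.getD r [] ∈ g := by
  rw [List.getD_eq_getElem _ _ hr]; exact List.getElem_mem _

theorem pvERun_eq_S_left (g : List (List Int)) (M : Nat)
    (hM : ∀ row ∈ g, row.length = M) (r c : Nat) (hr : r < g.length) (hc : c < M) :
    pvERun (g.getD r []) c = pvS g (g.length : Int) (M : Int) (r : Int) (c : Int) 0 (-1) := by
  have hdir : pvDirOK 0 (-1) := by unfold pvDirOK; norm_num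
  induction c with
  | zero =>
    have hin : pvInb (g.length : Int) (M : Int) ((r : Nat) : Int) (((0:Nat)) : Int) = true :=
      pvInb_true_iff.mpr (by omega)
    rw [pvS_rec hdir hin]
    have e1 : ((r:Nat):Int) + 0 = ((r:Nat):Int) := by ring
    have e2 : (((0:Nat)):Int) + -1 = (-1 : Int) := by norm_num
    rw [e1, e2]
    have hf : pvInb (g.length : Int) (M : Int) ((r:Nat):Int) (-1) = false := by
      simp only [pvInb, decide_eq_false_iff_not]; omega
    simp [pvERun, hf]
  | succ c ihc =>
    have hin : pvInb (g.length : Int) (M : Int) ((r : Nat) : Int) (((c+1:Nat)) : Int) = true :=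
      pvInb_true_iff.mpr (by omega)
    rw [pvS_rec hdir hin]
    have e1 : ((r:Nat):Int) + 0 = ((r:Nat):Int) := by ring
    have e2 : (((c+1:Nat)):Int) + -1 = ((c:Nat):Int) := by push_cast; ring
    rw [e1, e2]
    have hin' : pvInb (g.length : Int) (M : Int) ((r:Nat):Int) ((c:Nat):Int) = true :=
      pvInb_true_iff.mpr (by omega)
    rw [hin', Bool.true_and]
    rw [pvAt_nat, pvAt_nat]
    have ihc' := ihc (by omega)
    simp only [pvERun]
    have hbe2 : ((g.getD r []).getD c 0 == (g.getD r []).getD (c+1) 0)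
        = ((g.getD r []).getD (c+1) 0 == (g.getD r []).getD c 0) := BEq.comm
    rw [hbe2]
    cases hbe : ((g.getD r []).getD (c+1) 0 == (g.getD r []).getD c 0) with
    | false => simp [hbe]
    | true => simp only [hbe, if_true, ihc']; omega

theorem pvERun_rev_eq_S_right (g : List (List Int)) (M : Nat)
    (hM : ∀ row ∈ g, row.length = M) (r : Nat) (hr : r < g.length) :
    ∀ (k c : Nat), c < M → M - 1 - c = k →
      pvERun ((g.getD r []).reverse) k = pvS g (g.length : Int) (M : Int) (r : Int) (c : Int) 0 1 := by
  have hdir : pvDirOK 0 1 := by unfold pvDirOK; norm_num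
  have hlen : (g.getD r []).length = M := hM _ (pvRow_mem g r hr)
  have hrevlen : ((g.getD r []).reverse).length = M := by rw [List.length_reverse, hlen]
  have hrev : ∀ i, i < M → ((g.getD r []).reverse).getD i 0 = (g.getD r []).getD (M - 1 - i) 0 := by
    intro i hi
    rw [List.getD_eq_getElem ((g.getD r []).reverse) 0 (by omega),
        List.getD_eq_getElem (g.getD r []) 0 (by omega)]
    simp only [List.getElem_reverse]
    congr 1
    omega
  intro k
  induction k with
  | zero =>
    intro c hc hk
    have hin : pvInb (g.length : Int) (M : Int) ((r : Nat) : Int) ((c : Nat) : Int) = true :=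
      pvInb_true_iff.mpr (by omega)
    rw [pvS_rec hdir hin]
    have e1 : ((r:Nat):Int) + 0 = ((r:Nat):Int) := by ring
    have hf : pvInb (g.length : Int) (M : Int) ((r:Nat):Int) (((c:Nat):Int) + 1) = false := by
      simp only [pvInb, decide_eq_false_iff_not]; omega
    rw [e1, hf]
    simp [pvERun]
  | succ k ihk =>
    intro c hc hk
    have hin : pvInb (g.length : Int) (M : Int) ((r : Nat) : Int) ((c : Nat) : Int) = true :=
      pvInb_true_iff.mpr (by omega)
    rw [pvS_rec hdir hin]
    have e1 : ((r:Nat):Int) + 0 = ((r:Nat):Int) := by ring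
    have e2 : ((c:Nat):Int) + 1 = (((c+1:Nat)):Int) := by push_cast; ring
    rw [e1, e2]
    have hin' : pvInb (g.length : Int) (M : Int) ((r:Nat):Int) (((c+1:Nat)):Int) = true :=
      pvInb_true_iff.mpr (by omega)
    rw [hin', Bool.true_and]
    rw [pvAt_nat, pvAt_nat]
    have ihk' := ihk (c+1) (by omega) (by omega)
    simp only [pvERun]
    rw [hrev (k+1) (by omega), hrev k (by omega),
        show M - 1 - (k+1) = c by omega, show M - 1 - k = c + 1 by omega]
    have hbe2 : ((g.getD r []).getD (c+1) 0 == (g.getD r []).getD c 0)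
        = ((g.getD r []).getD c 0 == (g.getD r []).getD (c+1) 0) := BEq.comm
    rw [hbe2]
    cases hbe : ((g.getD r []).getD c 0 == (g.getD r []).getD (c+1) 0) with
    | false => simp [hbe]
    | true => simp only [hbe, if_true, ihk']; omega


theorem pvVGo_getD (g : List (List Int)) (M : Nat)
    (hM : ∀ row ∈ g, row.length = M) (dc : Int)
    (hdc : dc = -1 ∨ dc = 0 ∨ dc = 1) :
    ∀ (rows : List (List Int)) (r0 : Nat) (prev : Option (List Int × List Int)),
      g.drop r0 = rows →
      (r0 = 0 ∧ prev = none ∨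
        ∃ r' pruns, r0 = r' + 1 ∧ prev = some (g.getD r' [], pruns) ∧
          (∀ c : Nat, c < M → pruns.getD c 0
              = pvS g (g.length : Int) (M : Int) (r' : Int) (c : Int) (-1) (-dc))) →
      ∀ i c : Nat, i < rows.length → c < M →
        ((pvVGo dc prev rows).getD i []).getD c 0
          = pvS g (g.length : Int) (M : Int) ((r0 + i : Nat) : Int) (c : Int) (-1) (-dc) := by
  have hdir : pvDirOK (-1) (-dc) := by
    rcases hdc with rfl | rfl | rfl <;> (unfold pvDirOK; norm_num)
  intro rows
  induction rows with
  | nil => intro r0 prev _ _ i c hi _; simp at hi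
  | cons row rest ih =>
    intro r0 prev hdrop hprev i c hi hc
    have hr0 : r0 < g.length := by
      by_contra h
      rw [List.drop_eq_nil_of_le (by omega)] at hdrop
      exact List.cons_ne_nil row rest hdrop.symm
    have hrow : g.getD r0 [] = row := by
      have h0 : (g.drop r0)[0]? = some row := by rw [hdrop]; rfl
      rw [List.getElem?_drop] at h0
      simp only [Nat.add_zero] at h0
      simp [List.getD_eq_getElem?_getD, h0]
    have htail : g.drop (r0 + 1) = rest := by
      have h1 := congrArg List.tail hdrop
      rw [List.tail_drop] at h1
      simpa using h1
    have hrowlen : row.length = M := hM row (hrow ▸ pvRow_mem g r0 hr0)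
    rcases hprev with ⟨rfl, rfl⟩ | ⟨r', pruns, rfl, rfl, hpruns⟩
    · -- first row: runs = [1,1,…]
      have Hruns : ∀ c' : Nat, c' < M →
          (row.map (fun _ => (1:Int))).getD c' 0
            = pvS g (g.length : Int) (M : Int) (((0:Nat)) : Int) ((c' : Nat) : Int) (-1) (-dc) := by
        intro c' hc'
        have hin : pvInb (g.length : Int) (M : Int) (((0:Nat)) : Int) ((c' : Nat) : Int) = true :=
          pvInb_true_iff.mpr (by omega)
        rw [pvS_rec hdir hin]
        have hf : pvInb (g.length : Int) (M : Int) ((((0:Nat)) : Int) + -1) (((c' : Nat) : Int) + -dc) = false := by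
          simp only [pvInb, decide_eq_false_iff_not]; omega
        rw [hf, Bool.false_and, if_neg (by simp)]
        rw [List.getD_eq_getElem _ _ (by simpa [hrowlen] using hc'), List.getElem_map]
        norm_num
      cases i with
      | zero =>
        simp only [pvVGo, List.getD_cons_zero, Nat.add_zero]
        exact Hruns c hc
      | succ i =>
        simp only [pvVGo, List.getD_cons_succ]
        have h3 := ih 1 (some (row, row.map (fun _ => (1:Int)))) htail
          (Or.inr ⟨0, row.map (fun _ => (1:Int)), rfl, by rw [hrow], Hruns⟩)
          i c (by simpa using hi) hc
        rw [show (0:Nat) + (i + 1) = 1 + i by omega]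
        exact h3
    · -- later row: runs = pvRowStep from the previous row
      have hr' : r' < g.length := by omega
      have hprowlen : (g.getD r' []).length = M := hM _ (pvRow_mem g r' hr')
      have Hruns : ∀ c' : Nat, c' < M →
          (pvRowStep dc (g.getD r' []) pruns 0 row).getD c' 0
            = pvS g (g.length : Int) (M : Int) (((r' + 1 : Nat)) : Int) ((c' : Nat) : Int) (-1) (-dc) := by
        intro c' hc'
        rw [pvRowStep_getD dc (g.getD r' []) pruns row 0 c' (by omega)]
        have hin : pvInb (g.length : Int) (M : Int) (((r' + 1 : Nat)) : Int) ((c' : Nat) : Int) = true :=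
          pvInb_true_iff.mpr (by omega)
        rw [pvS_rec hdir hin]
        have e1 : (((r' + 1 : Nat)) : Int) + -1 = ((r' : Nat) : Int) := by push_cast; ring
        have e2 : (0 : Int) + ((c' : Nat) : Int) - dc = ((c' : Nat) : Int) + -dc := by ring
        rw [e1, e2, hprowlen]
        by_cases hb : 0 ≤ ((c' : Nat) : Int) + -dc ∧ ((c' : Nat) : Int) + -dc < (M : Int)
        · rw [if_pos hb]
          obtain ⟨hb1, hb2⟩ := hb
          have hk : ((c' : Nat) : Int) + -dc = (((((c' : Nat) : Int) + -dc).toNat : Nat) : Int) := by omega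
          have hkM : (((c' : Nat) : Int) + -dc).toNat < M := by omega
          have hin' : pvInb (g.length : Int) (M : Int) ((r' : Nat) : Int) (((c' : Nat) : Int) + -dc) = true :=
            pvInb_true_iff.mpr (by omega)
          rw [hin', Bool.true_and]
          rw [hk, PySem.List.pyGetD_natCast, PySem.List.pyGetD_natCast]
          rw [pvAt_nat, pvAt_nat, hrow]
          cases hbe : ((g.getD r' []).getD (((c' : Nat) : Int) + -dc).toNat 0 == row.getD c' 0) with
          | false => simp [hbe]
          | true =>
            simp only [hbe, if_true]
            rw [hpruns _ hkM]
            omega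
        · rw [if_neg hb]
          have hf : pvInb (g.length : Int) (M : Int) ((r' : Nat) : Int) (((c' : Nat) : Int) + -dc) = false := by
            simp only [pvInb, decide_eq_false_iff_not]; omega
          rw [hf, Bool.false_and, if_neg (by simp)]
          norm_num
      cases i with
      | zero =>
        simp only [pvVGo, List.getD_cons_zero, Nat.add_zero]
        exact Hruns c hc
      | succ i =>
        simp only [pvVGo, List.getD_cons_succ]
        have h3 := ih (r' + 1 + 1) (some (row, pvRowStep dc (g.getD r' []) pruns 0 row)) htail
          (Or.inr ⟨r' + 1, pvRowStep dc (g.getD r' []) pruns 0 row, rfl, by rw [hrow], Hruns⟩)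
          i c (by simpa using hi) hc
        rw [show r' + 1 + (i + 1) = r' + 1 + 1 + i by omega]
        exact h3


theorem pvHGo_length : ∀ (xs : List Int) (prev : Option (Int × Int)),
    (pvHGo prev xs).length = xs.length := by
  intro xs
  induction xs with
  | nil => intro prev; rfl
  | cons x xs ih => intro prev; simp [pvHGo, ih]

theorem pvAt_reverse (g : List (List Int)) (k c : Nat) (hk : k < g.length) :
    pvAt g.reverse (k : Int) (c : Int) = pvAt g ((g.length - 1 - k : Nat) : Int) (c : Int) := by
  rw [pvAt_nat, pvAt_nat]
  congr 1
  rw [List.getD_eq_getElem _ _ (by simpa using hk), List.getD_eq_getElem _ _ (by omega),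
      List.getElem_reverse]

theorem pvWalk_reverse (g : List (List Int)) (m v er ec : Int) :
    ∀ (f : Nat) (r c : Int),
      pvWalk g.reverse (g.length : Int) m v r c er ec f
        = pvWalk g (g.length : Int) m v ((g.length : Int) - 1 - r) c (-er) ec f := by
  intro f
  induction f with
  | zero => intro r c; rfl
  | succ f ih =>
    intro r c
    simp only [pvWalk]
    have hinb : pvInb (g.length : Int) m ((g.length : Int) - 1 - r) c = pvInb (g.length : Int) m r c := by
      simp only [pvInb]
      exact decide_eq_decide.mpr (by constructor <;> intro h <;> omega)
    rw [hinb]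
    cases hb : pvInb (g.length : Int) m r c with
    | false => simp
    | true =>
      have hbb := pvInb_true_iff.mp hb
      have hat : pvAt g.reverse r c = pvAt g ((g.length : Int) - 1 - r) c := by
        rw [show r = ((r.toNat : Nat) : Int) by omega, show c = ((c.toNat : Nat) : Int) by omega,
            show (g.length : Int) - 1 - ((r.toNat : Nat) : Int) = ((g.length - 1 - r.toNat : Nat) : Int) by omega]
        exact pvAt_reverse g r.toNat c.toNat (by omega)
      rw [hat, ih]
      rw [show (g.length : Int) - 1 - (r + er) = (g.length : Int) - 1 - r + -er by ring]

theorem pvS_reverse (g : List (List Int)) (m : Int) (k : Nat) (c ec : Int)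
    (hk : k < g.length) :
    pvS g.reverse (g.length : Int) m (k : Int) c (-1) ec
      = pvS g (g.length : Int) m ((g.length - 1 - k : Nat) : Int) c 1 ec := by
  unfold pvS
  have hmu : pvMu (g.length : Int) m (k : Int) c (-1) ec
      = pvMu (g.length : Int) m ((g.length - 1 - k : Nat) : Int) c 1 ec := by
    unfold pvMu; split_ifs <;> omega
  have hat : pvAt g.reverse (k : Int) c = pvAt g ((g.length - 1 - k : Nat) : Int) c := by
    by_cases h0 : 0 ≤ c
    · rw [show c = ((c.toNat : Nat) : Int) by omega]
      exact pvAt_reverse g k c.toNat hk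
    · -- negative column: both sides read the same (mirrored) row
      rw [pvAt, pvAt]
      congr 2
      rw [PySem.List.pyGet?_natCast, PySem.List.pyGet?_natCast,
          List.getElem?_reverse (by omega)]
  rw [hmu, hat, pvWalk_reverse]
  rw [show (g.length : Int) - 1 - (k : Int) = ((g.length - 1 - k : Nat) : Int) by omega]
  norm_num

theorem pvTabF (g : List (List Int)) (M : Nat) (hM : ∀ row ∈ g, row.length = M)
    (dc : Int) (hdc : dc = -1 ∨ dc = 0 ∨ dc = 1) (r c : Nat) (hr : r < g.length) (hc : c < M) :
    pvAt (pvVGo dc none g) (r : Int) (c : Int)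
      = pvS g (g.length : Int) (M : Int) (r : Int) (c : Int) (-1) (-dc) := by
  rw [pvAt_nat]
  have h := pvVGo_getD g M hM dc hdc g 0 none rfl (Or.inl ⟨rfl, rfl⟩) r c hr hc
  simpa using h

theorem pvTabB (g : List (List Int)) (M : Nat) (hM : ∀ row ∈ g, row.length = M)
    (dc : Int) (hdc : dc = -1 ∨ dc = 0 ∨ dc = 1) (r c : Nat) (hr : r < g.length) (hc : c < M) :
    pvAt ((pvVGo (-dc) none g.reverse).reverse) (r : Int) (c : Int)
      = pvS g (g.length : Int) (M : Int) (r : Int) (c : Int) 1 dc := by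
  rw [pvAt_nat]
  have hlrev : (pvVGo (-dc) none g.reverse).length = g.length := by
    rw [pvVGo_length]; simp
  have hgetD : ((pvVGo (-dc) none g.reverse).reverse).getD r []
      = (pvVGo (-dc) none g.reverse).getD (g.length - 1 - r) [] := by
    rw [List.getD_eq_getElem _ _ (by simp [hlrev]; omega),
        List.getD_eq_getElem _ _ (by omega), List.getElem_reverse]
    congr 1
    omega
  rw [hgetD]
  have hMrev : ∀ row ∈ g.reverse, row.length = M := fun row h => hM row (List.mem_reverse.mp h)
  have hdc' : -dc = -1 ∨ -dc = 0 ∨ -dc = 1 := by omega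
  have h := pvVGo_getD g.reverse M hMrev (-dc) hdc' g.reverse 0 none rfl (Or.inl ⟨rfl, rfl⟩)
    (g.length - 1 - r) c (by simpa using (by omega : g.length - 1 - r < g.length)) hc
  simp only [Nat.zero_add, List.length_reverse, neg_neg] at h
  rw [h, pvS_reverse g (M : Int) (g.length - 1 - r) (c : Int) dc (by omega)]
  rw [show g.length - 1 - (g.length - 1 - r) = r by omega]

theorem pvTabHF (g : List (List Int)) (M : Nat) (hM : ∀ row ∈ g, row.length = M)
    (r c : Nat) (hr : r < g.length) (hc : c < M) :
    pvAt (g.map (pvHGo none)) (r : Int) (c : Int)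
      = pvS g (g.length : Int) (M : Int) (r : Int) (c : Int) 0 (-1) := by
  rw [pvAt_nat]
  have h1 : (g.map (pvHGo none)).getD r [] = pvHGo none (g.getD r []) := by
    rw [List.getD_eq_getElem _ _ (by simpa using hr), List.getElem_map,
        List.getD_eq_getElem _ _ hr]
  rw [h1]
  have hlen : (g.getD r []).length = M := hM _ (pvRow_mem g r hr)
  have h2 := pvHGo_getD (g.getD r []) (g.getD r []) 0 none (by simp) (Or.inl ⟨rfl, rfl⟩) c
    (by omega)
  simp only [Nat.zero_add] at h2
  rw [h2]
  exact pvERun_eq_S_left g M hM r c hr hc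

theorem pvTabHB (g : List (List Int)) (M : Nat) (hM : ∀ row ∈ g, row.length = M)
    (r c : Nat) (hr : r < g.length) (hc : c < M) :
    pvAt (g.map (fun row => (pvHGo none row.reverse).reverse)) (r : Int) (c : Int)
      = pvS g (g.length : Int) (M : Int) (r : Int) (c : Int) 0 1 := by
  rw [pvAt_nat]
  have h1 : (g.map (fun row => (pvHGo none row.reverse).reverse)).getD r []
      = (pvHGo none (g.getD r []).reverse).reverse := by
    rw [List.getD_eq_getElem _ _ (by simpa using hr), List.getElem_map,
        List.getD_eq_getElem _ _ hr]
  rw [h1]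
  have hlen : (g.getD r []).length = M := hM _ (pvRow_mem g r hr)
  have hlen2 : (pvHGo none (g.getD r []).reverse).length = M := by
    rw [pvHGo_length, List.length_reverse, hlen]
  have h2 : ((pvHGo none (g.getD r []).reverse).reverse).getD c 0
      = (pvHGo none (g.getD r []).reverse).getD (M - 1 - c) 0 := by
    rw [List.getD_eq_getElem _ _ (by rw [List.length_reverse, hlen2]; omega),
        List.getD_eq_getElem (pvHGo none (g.getD r []).reverse) 0 (by omega)]
    simp only [List.getElem_reverse]
    congr 1
    omega
  rw [h2]
  have h3 := pvHGo_getD ((g.getD r []).reverse) ((g.getD r []).reverse) 0 none (by simp)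
    (Or.inl ⟨rfl, rfl⟩) (M - 1 - c) (by rw [List.length_reverse, hlen]; omega)
  simp only [Nat.zero_add] at h3
  rw [h3]
  exact pvERun_rev_eq_S_right g M hM r hr (M - 1 - c) c hc rfl


theorem pvWalk_eq_tab (g : List (List Int)) (M : Nat) (v a b dr dc : Int) (hd : pvDirOK dr dc)
    (tb : List (List Int))
    (htb : ∀ r' c' : Nat, r' < g.length → c' < M →
      pvAt tb (r' : Int) (c' : Int) = pvS g (g.length : Int) (M : Int) (r' : Int) (c' : Int) dr dc)
    (f : Nat) (hf : pvMu (g.length : Int) (M : Int) a b dr dc ≤ f) :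
    pvWalk g (g.length : Int) (M : Int) v a b dr dc f
      = (if pvInb (g.length : Int) (M : Int) a b && (pvAt g a b == v) then pvAt tb a b else 0) := by
  cases hc : (pvInb (g.length : Int) (M : Int) a b && (pvAt g a b == v)) with
  | false => rw [pvWalk_zero_of_not_cond hc]; simp
  | true =>
    obtain ⟨hin, heq⟩ := Bool.and_eq_true_iff.mp hc
    have hv : pvAt g a b = v := eq_of_beq heq
    rw [pvWalk_eq_S hd hf hv]
    have hbb := pvInb_true_iff.mp hin
    rw [show a = ((a.toNat : Nat) : Int) by omega, show b = ((b.toNat : Nat) : Int) by omega]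
    rw [htb a.toNat b.toNat (by omega) (by omega)]
    simp

theorem pvDir_eq (g : List (List Int)) (M : Nat) (v r c dr dc : Int) (hd : pvDirOK dr dc)
    (ftab btab : List (List Int))
    (hfor : ∀ r' c' : Nat, r' < g.length → c' < M →
      pvAt ftab (r' : Int) (c' : Int) = pvS g (g.length : Int) (M : Int) (r' : Int) (c' : Int) (-dr) (-dc))
    (hbak : ∀ r' c' : Nat, r' < g.length → c' < M →
      pvAt btab (r' : Int) (c' : Int) = pvS g (g.length : Int) (M : Int) (r' : Int) (c' : Int) dr dc)
    (hr : 0 ≤ r ∧ r < (g.length : Int)) (hc : 0 ≤ c ∧ c < (M : Int)) (F : Nat)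
    (hF : F = g.length + M + 1) :
    decide (5 ≤ 2 + pvWalk g (g.length : Int) (M : Int) v (r + dr) (c + dc) dr dc F
                  + pvWalk g (g.length : Int) (M : Int) v (r - dr) (c - dc) (-dr) (-dc) F)
    = decide (3 ≤ (if pvInb (g.length : Int) (M : Int) (r + dr) (c + dc)
                      && (pvAt g (r + dr) (c + dc) == v) then pvAt btab (r + dr) (c + dc) else 0)
                  + (if pvInb (g.length : Int) (M : Int) (r - dr) (c - dc)
                      && (pvAt g (r - dr) (c - dc) == v) then pvAt ftab (r - dr) (c - dc) else 0)) := by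
  have hd0 := hd
  obtain ⟨hd1, hd2, hd3⟩ := hd0
  have hd' : pvDirOK (-dr) (-dc) := ⟨by omega, by omega, by omega⟩
  have h1 := pvWalk_eq_tab g M v (r + dr) (c + dc) dr dc hd btab hbak F
    (by subst hF; unfold pvMu; split_ifs <;> omega)
  have h2 := pvWalk_eq_tab g M v (r - dr) (c - dc) (-dr) (-dc) hd' ftab hfor F
    (by subst hF; unfold pvMu; split_ifs <;> omega)
  rw [h1, h2]
  exact decide_eq_decide.mpr (by constructor <;> (intro h; omega))

theorem pvWin_eq (g : List (List Int)) (M : Nat) (hM : ∀ row ∈ g, row.length = M)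
    (hhd : (g.headD []).length = M) (v r c : Int)
    (hr : 0 ≤ r ∧ r < (g.length : Int)) (hc : 0 ≤ c ∧ c < (M : Int)) :
    pvIsWin2 g v r c = pvWinB g (g.length : Int) (M : Int) (pvTabs g) v r c := by
  have hb10 : ∀ r' c' : Nat, r' < g.length → c' < M →
      pvAt ((pvVGo 0 none g.reverse).reverse) (r' : Int) (c' : Int)
        = pvS g (g.length : Int) (M : Int) (r' : Int) (c' : Int) 1 0 := by
    intro r' c' h1 h2
    have := pvTabB g M hM 0 (by norm_num) r' c' h1 h2
    simpa using this
  have hb11 : ∀ r' c' : Nat, r' < g.length → c' < M →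
      pvAt ((pvVGo (-1) none g.reverse).reverse) (r' : Int) (c' : Int)
        = pvS g (g.length : Int) (M : Int) (r' : Int) (c' : Int) 1 1 := by
    intro r' c' h1 h2
    exact pvTabB g M hM 1 (by norm_num) r' c' h1 h2
  have hb1m1 : ∀ r' c' : Nat, r' < g.length → c' < M →
      pvAt ((pvVGo 1 none g.reverse).reverse) (r' : Int) (c' : Int)
        = pvS g (g.length : Int) (M : Int) (r' : Int) (c' : Int) 1 (-1) := by
    intro r' c' h1 h2
    have := pvTabB g M hM (-1) (by norm_num) r' c' h1 h2
    simpa using this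
  have hf10 : ∀ r' c' : Nat, r' < g.length → c' < M →
      pvAt (pvVGo 0 none g) (r' : Int) (c' : Int)
        = pvS g (g.length : Int) (M : Int) (r' : Int) (c' : Int) (-1) 0 := by
    intro r' c' h1 h2
    have := pvTabF g M hM 0 (by norm_num) r' c' h1 h2
    simpa using this
  have hf11 : ∀ r' c' : Nat, r' < g.length → c' < M →
      pvAt (pvVGo 1 none g) (r' : Int) (c' : Int)
        = pvS g (g.length : Int) (M : Int) (r' : Int) (c' : Int) (-1) (-1) := by
    intro r' c' h1 h2
    exact pvTabF g M hM 1 (by norm_num) r' c' h1 h2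
  have hf1m1 : ∀ r' c' : Nat, r' < g.length → c' < M →
      pvAt (pvVGo (-1) none g) (r' : Int) (c' : Int)
        = pvS g (g.length : Int) (M : Int) (r' : Int) (c' : Int) (-1) 1 := by
    intro r' c' h1 h2
    have := pvTabF g M hM (-1) (by norm_num) r' c' h1 h2
    simpa using this
  have hhf : ∀ r' c' : Nat, r' < g.length → c' < M →
      pvAt (g.map (pvHGo none)) (r' : Int) (c' : Int)
        = pvS g (g.length : Int) (M : Int) (r' : Int) (c' : Int) 0 (-1) :=
    fun r' c' h1 h2 => pvTabHF g M hM r' c' h1 h2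
  have hhb : ∀ r' c' : Nat, r' < g.length → c' < M →
      pvAt (g.map (fun row => (pvHGo none row.reverse).reverse)) (r' : Int) (c' : Int)
        = pvS g (g.length : Int) (M : Int) (r' : Int) (c' : Int) 0 1 :=
    fun r' c' h1 h2 => pvTabHB g M hM r' c' h1 h2
  have e1 := pvDir_eq g M v r c 1 0 (by unfold pvDirOK; norm_num)
    (pvVGo 0 none g) ((pvVGo 0 none g.reverse).reverse)
    (by simpa using hf10) hb10 hr hc (g.length + M + 1) rfl
  have e2 := pvDir_eq g M v r c 0 1 (by unfold pvDirOK; norm_num)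
    (g.map (pvHGo none)) (g.map (fun row => (pvHGo none row.reverse).reverse))
    (by simpa using hhf) hhb hr hc (g.length + M + 1) rfl
  have e3 := pvDir_eq g M v r c 1 1 (by unfold pvDirOK; norm_num)
    (pvVGo 1 none g) ((pvVGo (-1) none g.reverse).reverse)
    (by simpa using hf11) hb11 hr hc (g.length + M + 1) rfl
  have e4 := pvDir_eq g M v r c 1 (-1) (by unfold pvDirOK; norm_num)
    (pvVGo (-1) none g) ((pvVGo 1 none g.reverse).reverse)
    (by simpa using hf1m1) hb1m1 hr hc (g.length + M + 1) rfl
  simp only [pvIsWin2, pvWinB, pvTabs, pvDirs, List.any_cons, List.any_nil, hhd]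
  rw [e1, e2, e3, e4]


theorem pvScan_eq (board grid : List (List Int)) (n m p o : Int)
    (tabs : List ((Int × Int) × List (List Int) × List (List Int)))
    (hat : ∀ r c : Int, (0 ≤ r ∧ r < n ∧ 0 ≤ c ∧ c < m) → pvAt board r c = pvAt grid r c)
    (hwin : ∀ v r c : Int, (0 ≤ r ∧ r < n ∧ 0 ≤ c ∧ c < m) →
      pvIsWin2 board v r c = pvWinB grid n m tabs v r c) :
    ∀ cells : List (Int × Int),
      (∀ rc ∈ cells, 0 ≤ rc.1 ∧ rc.1 < n ∧ 0 ≤ rc.2 ∧ rc.2 < m) →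
      pvScanA board p o cells = pvScanB grid n m p o tabs cells := by
  intro cells
  induction cells with
  | nil => intro _; rfl
  | cons rc rest ih =>
    intro hmem
    have hb := hmem rc (by simp)
    simp only [pvScanA, pvScanB]
    rw [hat rc.1 rc.2 hb, hwin p rc.1 rc.2 hb, hwin o rc.1 rc.2 hb,
        ih (fun x hx => hmem x (by simp [hx]))]

-- ===== VERDICT (by name: the statement is the Claim_ definition above) =====
set_option maxHeartbeats 2000000 in
theorem check_heuristic2_spec : Claim_equal_check_heuristic2 := by
  intro board player opponent _ hpre
  unfold Spec_check_heuristic2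
  cases board with
  | nil => rfl
  | cons hd tl =>
    have hM : ∀ row ∈ (hd :: tl), hd.length ≤ row.length := by
      intro row hrow
      simpa using hpre row hrow
    unfold check_heuristic2 check_heuristic2_alt
    have hc0 : (((hd :: tl) : List (List Int)).length == 0) = false := by simp
    simp only [List.headD_cons, hc0, Bool.false_eq_true, if_false]
    have hgrid : (hd :: tl).map (fun row => PySem.List.slice row none (some ((hd.length : Nat) : Int)))
        = (hd :: tl).map (fun row => row.take hd.length) := by
      apply List.map_congr_left
      intro row _
      exact PySem.List.slice_to_natCast row hd.length
    rw [hgrid]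
    have hL : ((hd :: tl).map (fun row => row.take hd.length)).length = (hd :: tl).length :=
      List.length_map ..
    have hMrows : ∀ row ∈ (hd :: tl).map (fun row => row.take hd.length), row.length = hd.length := by
      intro row h
      rcases List.mem_map.mp h with ⟨row0, h0, rfl⟩
      rw [List.length_take]
      exact Nat.min_eq_left (hM row0 h0)
    have hat : ∀ r c : Int,
        (0 ≤ r ∧ r < (((hd :: tl) : List (List Int)).length : Int) ∧ 0 ≤ c ∧ c < ((hd.length : Nat) : Int)) →
        pvAt (hd :: tl) r c = pvAt ((hd :: tl).map (fun row => row.take hd.length)) r c := by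
      intro r c hb
      rw [show r = ((r.toNat : Nat) : Int) by omega, show c = ((c.toNat : Nat) : Int) by omega,
          pvAt_nat, pvAt_nat]
      have hr' : r.toNat < (hd :: tl).length := by omega
      have hrowg : ((hd :: tl).map (fun row => row.take hd.length)).getD r.toNat []
          = ((hd :: tl).getD r.toNat []).take hd.length := by
        rw [List.getD_eq_getElem _ _ (by simpa [List.length_map] using hr'), List.getElem_map,
            List.getD_eq_getElem _ _ hr']
      rw [hrowg]
      have hrowlen : hd.length ≤ ((hd :: tl).getD r.toNat []).length :=
        hM _ (pvRow_mem (hd :: tl) r.toNat hr')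
      rw [List.getD_eq_getElem (((hd :: tl).getD r.toNat []).take hd.length) 0
            (by rw [List.length_take]; omega),
          List.getD_eq_getElem ((hd :: tl).getD r.toNat []) 0 (by omega), List.getElem_take]
    have hwin : ∀ v r c : Int,
        (0 ≤ r ∧ r < (((hd :: tl) : List (List Int)).length : Int) ∧ 0 ≤ c ∧ c < ((hd.length : Nat) : Int)) →
        pvIsWin2 (hd :: tl) v r c
          = pvWinB ((hd :: tl).map (fun row => row.take hd.length))
              (((hd :: tl) : List (List Int)).length : Int) ((hd.length : Nat) : Int)
              (pvTabs ((hd :: tl).map (fun row => row.take hd.length))) v r c := by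
      intro v r c hb
      have hH : ((((hd :: tl).map (fun row => row.take hd.length)).headD []).length) = hd.length := by
        simp [List.length_take]
      have hcongr : pvIsWin2 (hd :: tl) v r c
          = pvIsWin2 ((hd :: tl).map (fun row => row.take hd.length)) v r c := by
        simp only [pvIsWin2, hL, hH, List.headD_cons]
        have hw := pvWalk_congr (g1 := (hd :: tl))
          (g2 := (hd :: tl).map (fun row => row.take hd.length))
          (n := (((hd :: tl) : List (List Int)).length : Int)) (m := ((hd.length : Nat) : Int))
          (fun r' c' hin => hat r' c' (pvInb_true_iff.mp hin))
        simp only [hw]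
      rw [hcongr]
      have hwe := pvWin_eq ((hd :: tl).map (fun row => row.take hd.length)) hd.length hMrows
        (by simpa using hH) v r c (by rw [hL]; omega) (by omega)
      rw [hwe, hL]
    apply pvScan_eq _ _ _ _ _ _ _ hat hwin
    intro rc hrc
    rcases List.mem_flatMap.mp hrc with ⟨r, hr, hrc2⟩
    rcases List.mem_map.mp hrc2 with ⟨c, hcl, rfl⟩
    have h1 := PySem.List.mem_pyRange_one.mp hr
    have h2 := PySem.List.mem_pyRange_one.mp hcl
    exact ⟨h1.1, h1.2, h2.1, h2.2⟩
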